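-- pv_equiv track=rewrite | github.com/blossom22/11_Inflearn_Algorithm | 6_greedy_1.py | solution
-- ===== SOURCE A (Python) =====
-- def solution(weight, limit):
--     answer = 0
--     temp =0
--     weight.sort()
--     for x in weight:
--         if temp+x > limit:
--             break
--         temp += x
--         answer += 1
--     return answer
-- ===== SOURCE B (Python) =====
-- def solution(weight, limit):
--     weight.sort()
--
--     # Divide and conquer over the sorted list: count how many leading items fit
--     # within the remaining budget; if the whole left half fits, continue on the
--     # right half with the budget reduced by the left half's total.
--     def go(lo, hi, rem):
--         if lo == hi:
--             return 0
--         if hi - lo == 1: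
--             return 1 if weight[lo] <= rem else 0
--         mid = (lo + hi) // 2
--         c = go(lo, mid, rem)
--         if c < mid - lo:
--             return c
--         return c + go(mid, hi, rem - sum(weight[lo:mid]))
--
--     return go(0, len(weight), limit)
-- ===== Notes on version B (the rewrite author's own statement) =====
-- stated objective: alternative
-- what changed: Replaces the linear running-total loop with a divide-and-conquer recursion on the sorted list: count the fitting prefix of the left half and, only if the whole left half fits, recurse on the right half with the budget reduced by the left half's sum.
import Mathlib
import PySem

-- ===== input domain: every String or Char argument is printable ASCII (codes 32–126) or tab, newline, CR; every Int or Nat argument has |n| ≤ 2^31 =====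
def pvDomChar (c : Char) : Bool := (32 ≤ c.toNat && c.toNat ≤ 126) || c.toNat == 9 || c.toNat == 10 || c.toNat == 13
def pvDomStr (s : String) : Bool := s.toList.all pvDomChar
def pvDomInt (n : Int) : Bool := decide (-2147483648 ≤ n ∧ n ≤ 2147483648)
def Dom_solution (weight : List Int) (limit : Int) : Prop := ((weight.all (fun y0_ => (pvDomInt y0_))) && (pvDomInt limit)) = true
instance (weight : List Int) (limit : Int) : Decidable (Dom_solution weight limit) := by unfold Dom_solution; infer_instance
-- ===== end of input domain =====

-- B replaces A's linear break loop with divide-and-conquer on the sorted list (alternative algorithm, same cost).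
-- A sorts its argument in place; the equivalence proved here is about the return value only.
-- ===== PORT A =====
def solutionLoopA (limit : Int) : List Int → Int → Int → Int
  | [], _, answer => answer
  | x :: xs, temp, answer =>
    if temp + x > limit then answer
    else solutionLoopA limit xs (temp + x) (answer + 1)

def solution (weight : List Int) (limit : Int) : Int :=
  solutionLoopA limit (PySem.List.sorted weight (fun x => x)) 0 0

-- ===== PORT B =====
-- go(lo,hi,rem) on indices, as lists: here the slice weight[lo:hi] is passed directly.
-- structural recursion on a length bound (fuel) only to make the recursion structural; the
-- algorithm is Source B's divide and conquer, and fuel = length always suffices.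
def solutionGo : Nat → List Int → Int → Int
  | _, [], _ => 0
  | _, [x], rem => if x ≤ rem then 1 else 0
  | 0, _ :: _ :: _, _ => 0  -- unreachable: fuel is always ≥ length
  | fuel + 1, x :: y :: t, rem =>
    let l := x :: y :: t
    let mid := l.length / 2
    let c := solutionGo fuel (l.take mid) rem
    if c < (mid : Int) then c
    else c + solutionGo fuel (l.drop mid) (rem - (l.take mid).sum)

def solution_alt (weight : List Int) (limit : Int) : Int :=
  solutionGo (PySem.List.sorted weight (fun x => x)).length
    (PySem.List.sorted weight (fun x => x)) limit

-- ===== PRECONDITION & SPEC =====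
def Spec_solution (weight : List Int) (limit : Int) (out : Int) : Prop := out = solution_alt weight limit
instance (weight : List Int) (limit : Int) (out : Int) : Decidable (Spec_solution weight limit out) := by unfold Spec_solution; infer_instance

-- ===== CLAIM (what is proved, stated in full; the proofs are below) =====
def Claim_equal_solution : Prop := ∀ (weight : List Int) (limit : Int), Dom_solution weight limit → Spec_solution weight limit (solution weight limit)

-- ===== LEMMAS AND PROOFS =====
-- Reference count: length of the fitting prefix, with the budget consumed left to right.
def cnt (rem : Int) : List Int → Int
  | [] => 0
  | x :: xs => if x > rem then 0 else 1 + cnt (rem - x) xs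

theorem cnt_bounds (l : List Int) : ∀ rem, 0 ≤ cnt rem l ∧ cnt rem l ≤ (l.length : Int) := by
  induction l with
  | nil => intro rem; simp [cnt]
  | cons x xs ih =>
    intro rem
    simp only [cnt, List.length_cons]
    split_ifs
    · constructor <;> push_cast <;> omega
    · have := ih (rem - x)
      constructor <;> push_cast <;> omega

theorem loopA_eq_cnt (limit : Int) :
    ∀ (l : List Int) (temp answer : Int),
      solutionLoopA limit l temp answer = answer + cnt (limit - temp) l := by
  intro l
  induction l with
  | nil => intro temp answer; simp [solutionLoopA, cnt]
  | cons x xs ih =>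
    intro temp answer
    simp only [solutionLoopA, cnt]
    by_cases h : temp + x > limit
    · rw [if_pos h, if_pos (by omega : x > limit - temp)]; ring
    · rw [if_neg h, if_neg (by omega : ¬ x > limit - temp), ih]
      have : limit - (temp + x) = limit - temp - x := by ring
      rw [this]; ring

theorem cnt_append (l₁ l₂ : List Int) : ∀ rem,
    cnt rem (l₁ ++ l₂) =
      if cnt rem l₁ = (l₁.length : Int) then (l₁.length : Int) + cnt (rem - l₁.sum) l₂
      else cnt rem l₁ := by
  induction l₁ with
  | nil => intro rem; simp [cnt]
  | cons x xs ih =>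
    intro rem
    simp only [List.cons_append, cnt, List.length_cons, List.sum_cons]
    by_cases h : x > rem
    · have hne : (0 : Int) ≠ ((xs.length : Int) + 1) := by
        have := cnt_bounds xs rem; push_cast; omega
      rw [if_pos h, if_pos h, if_neg (by push_cast at hne ⊢; omega)]
    · rw [if_neg h, if_neg h, ih (rem - x)]
      by_cases hc : cnt (rem - x) xs = (xs.length : Int)
      · rw [if_pos hc, if_pos (by push_cast; omega)]
        have : rem - x - xs.sum = rem - (x + xs.sum) := by ring
        rw [this]; push_cast; ring
      · rw [if_neg hc, if_neg (by push_cast; omega)]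

theorem go_eq_cnt : ∀ (fuel : Nat) (l : List Int), l.length ≤ fuel → ∀ rem,
    solutionGo fuel l rem = cnt rem l := by
  intro fuel
  induction fuel with
  | zero =>
    intro l hl rem
    match l with
    | [] => simp [solutionGo, cnt]
    | [x] => simp at hl
    | a :: b :: t => simp at hl
  | succ fuel ih =>
    intro l hl rem
    match l with
    | [] => simp [solutionGo, cnt]
    | [x] =>
      simp only [solutionGo]
      by_cases h : x ≤ rem
      · rw [if_pos h]; simp [cnt, show ¬ x > rem by omega]
      · rw [if_neg h]; simp [cnt, show x > rem by omega]
    | a :: b :: t =>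
      rw [solutionGo]
      set l' := a :: b :: t with hl'
      set mid := l'.length / 2 with hmid
      have hlen2 : 2 ≤ l'.length := by simp only [hl', List.length_cons]; omega
      have hmidlt : mid < l'.length := by rw [hmid]; omega
      have hmidpos : 0 < mid := by rw [hmid]; omega
      have htlen : (l'.take mid).length = mid :=
        List.length_take_of_le (le_of_lt hmidlt)
      have hdlen : (l'.drop mid).length = l'.length - mid := by
        rw [List.length_drop]
      have hfl : l'.length ≤ fuel + 1 := by rw [hl'] at hl ⊢; exact hl
      have h1 : solutionGo fuel (l'.take mid) rem = cnt rem (l'.take mid) := by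
        apply ih _ (by omega)
      have h2 : solutionGo fuel (l'.drop mid) (rem - (l'.take mid).sum)
          = cnt (rem - (l'.take mid).sum) (l'.drop mid) := by
        apply ih _ (by omega)
      rw [h1, h2]
      have hsplit : l'.take mid ++ l'.drop mid = l' := List.take_append_drop mid l'
      conv_rhs => rw [← hsplit]
      rw [cnt_append]
      have hb := cnt_bounds (l'.take mid) rem
      rw [htlen] at *
      by_cases hc : cnt rem (l'.take mid) = (mid : Int)
      · rw [if_pos hc, if_neg (by omega), hc]
      · rw [if_neg hc, if_pos (by omega)]

-- ===== VERDICT (by name: the statement is the Claim_ definition above) =====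
theorem solution_spec : Claim_equal_solution := by
  intro weight limit _
  unfold Spec_solution solution solution_alt
  rw [loopA_eq_cnt, go_eq_cnt _ _ le_rfl]
  simp
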